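-- pv_equiv track=rewrite | github.com/kosarev/zx | zx/_tape.py | tag_last_pulse
-- ===== SOURCE A (Python) =====
-- import typing
--
-- def tag_last_pulse(pulses: typing.Iterable[tuple[bool, int,
--                                                  tuple[str, ...]]]) -> (
--         typing.Iterable[tuple[bool, int, tuple[str, ...]]]):
--     current_pulse = None
--     for pulse in pulses:
--         if current_pulse:
--             yield current_pulse
--         current_pulse = pulse
--
--     if current_pulse:
--         level, duration, ids = current_pulse
--         if 'END' not in ids:
--             ids = tuple(list(ids) + ['END'])
--             yield level, duration, ids
-- ===== SOURCE B (Python) =====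
-- def tag_last_pulse(pulses):
--     items = list(pulses)
--     for p in items[:-1]:
--         yield p
--     if items:
--         level, duration, ids = items[-1]
--         if 'END' not in ids:
--             yield (level, duration, ids + ('END',))
-- ===== Notes on version B (the rewrite author's own statement) =====
-- stated objective: simpler
-- what changed: Replaces the streaming one-behind look-ahead loop (carrying the previous pulse in a variable) with materializing the input once and indexing: yield items[:-1], then tag items[-1] directly.
import Mathlib
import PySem

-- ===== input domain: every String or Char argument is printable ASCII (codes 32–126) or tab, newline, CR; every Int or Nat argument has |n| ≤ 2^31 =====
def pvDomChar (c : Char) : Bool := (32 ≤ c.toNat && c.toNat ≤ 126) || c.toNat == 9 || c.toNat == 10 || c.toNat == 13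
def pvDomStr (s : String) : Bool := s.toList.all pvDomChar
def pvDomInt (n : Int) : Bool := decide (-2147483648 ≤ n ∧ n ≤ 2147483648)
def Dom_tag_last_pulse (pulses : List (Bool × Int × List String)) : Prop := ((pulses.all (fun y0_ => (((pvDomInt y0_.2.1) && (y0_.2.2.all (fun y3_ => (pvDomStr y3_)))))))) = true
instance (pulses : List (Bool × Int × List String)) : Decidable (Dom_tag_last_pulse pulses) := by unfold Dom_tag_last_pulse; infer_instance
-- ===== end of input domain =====

-- B replaces A's one-behind look-ahead loop by materializing the list and indexing its last
-- element (objective: simpler). B consumes the whole iterable up front (observable only for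
-- lazy/infinite iterables, not for the finite lists treated here).

-- ===== PORT A =====
-- A: loop holding back the previous pulse in current_pulse (a 3-tuple is always truthy,
-- so 'if current_pulse:' is just a None test), then tag-and-yield the held-back last pulse.
def tag_last_pulse (pulses : List (Bool × Int × List String)) : List (Bool × Int × List String) :=
  let s := pulses.foldl
    (fun (s : List (Bool × Int × List String) × Option (Bool × Int × List String)) pulse =>
      match s.2 with
      | some c => (s.1 ++ [c], some pulse)
      | none => (s.1, some pulse))
    ([], none)
  match s.2 with
  | none => s.1
  | some (level, duration, ids) =>
      if "END" ∈ ids then s.1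
      else s.1 ++ [(level, duration, ids ++ ["END"])]

-- ===== PORT B =====
-- B: items[:-1] yielded as-is, then items[-1] tagged; getLast? plays items[-1] / the emptiness test.
def tag_last_pulse_alt (pulses : List (Bool × Int × List String)) : List (Bool × Int × List String) :=
  let front := pulses.dropLast
  match pulses.getLast? with
  | none => front
  | some (level, duration, ids) =>
      if "END" ∈ ids then front
      else front ++ [(level, duration, ids ++ ["END"])]

-- ===== PRECONDITION & SPEC =====
def Spec_tag_last_pulse (pulses : List (Bool × Int × List String)) (out : List (Bool × Int × List String)) : Prop := out = tag_last_pulse_alt pulses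
instance (pulses : List (Bool × Int × List String)) (out : List (Bool × Int × List String)) : Decidable (Spec_tag_last_pulse pulses out) := by unfold Spec_tag_last_pulse; infer_instance

-- ===== CLAIM (what is proved, stated in full; the proofs are below) =====
def Claim_equal_tag_last_pulse : Prop := ∀ (pulses : List (Bool × Int × List String)), Dom_tag_last_pulse pulses → Spec_tag_last_pulse pulses (tag_last_pulse pulses)

-- ===== LEMMAS AND PROOFS =====

-- A's loop, once started with a held pulse c, accumulates exactly dropLast and ends holding getLast.
theorem tag_fold_char (xs : List (Bool × Int × List String))
    (acc : List (Bool × Int × List String)) (c : Bool × Int × List String) :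
    xs.foldl
      (fun (s : List (Bool × Int × List String) × Option (Bool × Int × List String)) pulse =>
        match s.2 with
        | some c => (s.1 ++ [c], some pulse)
        | none => (s.1, some pulse))
      (acc, some c)
    = (acc ++ (c :: xs).dropLast, some ((c :: xs).getLast (by simp))) := by
  induction xs generalizing acc c with
  | nil => simp
  | cons y ys ih =>
      simp only [List.foldl_cons]
      rw [ih (acc ++ [c]) y]
      simp [List.getLast_cons]

theorem tag_last_pulse_spec : Claim_equal_tag_last_pulse := by
  intro pulses _
  unfold Spec_tag_last_pulse tag_last_pulse tag_last_pulse_alt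
  cases pulses with
  | nil => simp
  | cons p ps =>
      simp only [List.foldl_cons]
      rw [tag_fold_char ps [] p]
      simp [List.getLast?_eq_some_getLast]
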